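-- pv_equiv track=rewrite | github.com/bhavya2403/Learning-Python | Learning/Algorithms/DynamicProgramming/even_len_binary.py | evenLenBinary
-- ===== SOURCE A (Python) =====
-- def evenLenBinary(n):
--     m = 10**9 + 7
--     half = n//2 + 1
--     ncr = 1
--     res = 1
--     for r in range(1, half):
--         ncr = ((n-r+1)*ncr)//r
--         res += ncr*ncr
--     res *= 2
--     if not n%2:
--         res -= ncr*ncr
--
--     return res % m
-- ===== SOURCE B (Python) =====
-- def evenLenBinary(n):
--     # Compute C(2n, n) directly with the exact multiplicative recurrence
--     # C(n+r, r) = C(n+r-1, r-1) * (n+r) // r, then reduce mod 1e9+7 once.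
--     m = 10**9 + 7
--     c = 1
--     for r in range(1, n + 1):
--         c = c * (n + r) // r
--     return c % m
-- ===== Notes on version B (the rewrite author's own statement) =====
-- stated objective: alternative
-- what changed: B computes C(2n,n) directly with a single multiplicative binomial recurrence over row 2n, instead of A's summing the squares of half of row n, doubling, and applying a parity correction.
-- outside the precondition, e.g. on evenLenBinary(-1): A returns 2, B returns 1; on evenLenBinary(-2): A returns 1, B returns 1
import Mathlib
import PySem

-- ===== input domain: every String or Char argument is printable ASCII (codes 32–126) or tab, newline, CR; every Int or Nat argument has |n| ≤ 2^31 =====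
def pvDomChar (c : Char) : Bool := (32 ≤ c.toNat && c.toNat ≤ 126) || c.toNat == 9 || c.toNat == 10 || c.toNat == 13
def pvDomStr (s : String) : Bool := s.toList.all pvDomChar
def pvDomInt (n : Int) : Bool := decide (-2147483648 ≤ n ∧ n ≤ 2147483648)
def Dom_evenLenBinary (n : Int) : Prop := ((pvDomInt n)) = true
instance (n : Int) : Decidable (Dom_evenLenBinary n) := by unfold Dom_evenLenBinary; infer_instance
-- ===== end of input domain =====

-- B computes C(2n,n) directly by one multiplicative binomial recurrence instead of A's
-- doubled sum of squared binomials with a parity correction; similar cost, different algorithm.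

-- ===== PORT A =====
def evenLenBinary (n : Int) : Int :=
  let m : Int := 10 ^ 9 + 7
  let half : Int := PySem.Int.floordiv n 2 + 1
  let st := (PySem.List.pyRange 1 half 1).foldl
    (fun (st : Int × Int) (r : Int) =>
      let ncr := PySem.Int.floordiv ((n - r + 1) * st.1) r
      (ncr, st.2 + ncr * ncr))
    (1, 1)
  let res := st.2 * 2
  let res := if PySem.Int.mod n 2 = 0 then res - st.1 * st.1 else res
  PySem.Int.mod res m

-- ===== PORT B =====
def evenLenBinary_alt (n : Int) : Int :=
  let m : Int := 10 ^ 9 + 7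
  let c := (PySem.List.pyRange 1 (n + 1) 1).foldl
    (fun (c : Int) (r : Int) => PySem.Int.floordiv (c * (n + r)) r) 1
  PySem.Int.mod c m

-- ===== PRECONDITION & SPEC =====
-- Pre_ restricts to the function's natural domain n ≥ 0 (a count); for negative n, on which
-- A still returns (2 for odd n, 1 for even n, an accident of its empty loop and parity branch),
-- nothing is claimed.
def Pre_evenLenBinary (n : Int) : Prop := 0 ≤ n
instance (n : Int) : Decidable (Pre_evenLenBinary n) := by unfold Pre_evenLenBinary; infer_instance
def pvWitness_evenLenBinary : Int := (6)

def Spec_evenLenBinary (n : Int) (out : Int) : Prop := out = evenLenBinary_alt n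
instance (n : Int) (out : Int) : Decidable (Spec_evenLenBinary n out) := by unfold Spec_evenLenBinary; infer_instance

-- ===== CLAIM (what is proved, stated in full; the proofs are below) =====
def Claim_equal_evenLenBinary : Prop := ∀ (n : Int), Dom_evenLenBinary n → Pre_evenLenBinary n → Spec_evenLenBinary n (evenLenBinary n)

-- ===== LEMMAS AND PROOFS =====

-- B's loop over r = 1..k computes the binomial C(n+k, k) exactly.
lemma foldB_eq (n : ℕ) : ∀ (k : ℕ),
    (PySem.List.pyRange 1 ((k : Int) + 1) 1).foldl
      (fun (c : Int) (r : Int) => PySem.Int.floordiv (c * ((n : Int) + r)) r) 1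
      = ((n + k).choose k : ℤ) := by
  intro k
  induction k with
  | zero => rw [PySem.List.pyRange_one_eq_nil (by omega)]; simp
  | succ k ih =>
      have hsplit : PySem.List.pyRange 1 ((↑(k+1) : Int) + 1) 1
          = PySem.List.pyRange 1 ((k : Int) + 1) 1 ++ [(k : Int) + 1] := by
        have := PySem.List.pyRange_one_succ_right (a := 1) (b := (k : Int) + 1) (by omega)
        push_cast
        simpa using this
      rw [hsplit, List.foldl_append, ih]
      have hid : (n + k + 1) * ((n + k).choose k) = ((n + k + 1).choose (k + 1)) * (k + 1) :=
        Nat.add_one_mul_choose_eq (n + k) k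
      have hnum : ((n + k).choose k : ℤ) * ((n : Int) + ((k : Int) + 1))
          = ((((n + k + 1).choose (k + 1)) * (k + 1) : ℕ) : ℤ) := by
        push_cast
        nlinarith [hid]
      simp only [List.foldl_cons, List.foldl_nil]
      rw [hnum]
      have : ((k : Int) + 1) = ((k + 1 : ℕ) : ℤ) := by push_cast; ring
      rw [this, PySem.Int.floordiv_natCast]
      rw [Nat.mul_div_cancel _ (by omega)]
      norm_cast

-- A's loop over r = 1..k maintains (C(n,r), ∑_{j≤r} C(n,j)^2) exactly, for k ≤ n.
lemma foldA_eq (n : ℕ) : ∀ (k : ℕ), k ≤ n →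
    (PySem.List.pyRange 1 ((k : Int) + 1) 1).foldl
      (fun (st : Int × Int) (r : Int) =>
        let ncr := PySem.Int.floordiv (((n : Int) - r + 1) * st.1) r
        (ncr, st.2 + ncr * ncr))
      (1, 1)
      = ((n.choose k : ℤ), ((∑ j ∈ Finset.range (k + 1), (n.choose j) ^ 2 : ℕ) : ℤ)) := by
  intro k
  induction k with
  | zero => intro _; rw [PySem.List.pyRange_one_eq_nil (by omega)]; simp
  | succ k ih =>
      intro hk
      have hsplit : PySem.List.pyRange 1 ((↑(k+1) : Int) + 1) 1
          = PySem.List.pyRange 1 ((k : Int) + 1) 1 ++ [(k : Int) + 1] := by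
        have := PySem.List.pyRange_one_succ_right (a := 1) (b := (k : Int) + 1) (by omega)
        push_cast
        simpa using this
      rw [hsplit, List.foldl_append, ih (by omega)]
      have hid : (n - k) * (n.choose k) = (n.choose (k + 1)) * (k + 1) := by
        rw [Nat.choose_succ_right_eq]; ring
      have hnum : ((n : Int) - ((k : Int) + 1) + 1) * (n.choose k : ℤ)
          = (((n.choose (k + 1)) * (k + 1) : ℕ) : ℤ) := by
        have hnk : ((n : Int) - ((k : Int) + 1) + 1) = ((n - k : ℕ) : ℤ) := by
          push_cast [Nat.cast_sub (by omega : k ≤ n)]; ring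
        rw [hnk]
        push_cast
        exact_mod_cast congrArg (Nat.cast : ℕ → ℤ) hid
      simp only [List.foldl_cons, List.foldl_nil]
      rw [hnum]
      have hc : ((k : Int) + 1) = ((k + 1 : ℕ) : ℤ) := by push_cast; ring
      rw [hc, PySem.Int.floordiv_natCast, Nat.mul_div_cancel _ (by omega)]
      refine Prod.ext ?_ ?_
      · simp
      · simp only
        rw [Finset.sum_range_succ (n := k + 1)]
        push_cast
        ring

-- Vandermonde specialised: ∑_{r=0}^{n} C(n,r)^2 = C(n+n, n).
lemma sum_sq_choose (n : ℕ) :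
    ∑ r ∈ Finset.range (n + 1), (n.choose r) ^ 2 = (n + n).choose n := by
  rw [Nat.add_choose_eq, Finset.Nat.sum_antidiagonal_eq_sum_range_succ_mk]
  refine Finset.sum_congr rfl ?_
  intro r hr
  rw [Finset.mem_range] at hr
  simp only
  rw [pow_two]
  congr 1
  rw [Nat.choose_symm (by omega)]

-- Folding the symmetric half: A's aggregate equals C(2n, n).
lemma half_sum (n : ℕ) :
    2 * (∑ r ∈ Finset.range (n / 2 + 1), (n.choose r) ^ 2)
      = (n + n).choose n + (if n % 2 = 0 then (n.choose (n / 2)) ^ 2 else 0) := by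
  have hsplit : ∑ r ∈ Finset.range (n + 1), (n.choose r) ^ 2
      = (∑ r ∈ Finset.range (n / 2 + 1), (n.choose r) ^ 2)
        + ∑ i ∈ Finset.range (n - n / 2), (n.choose (n / 2 + 1 + i)) ^ 2 := by
    have h1 : n + 1 = (n / 2 + 1) + (n - n / 2) := by omega
    rw [h1, Finset.sum_range_add]
  have hupper : ∑ i ∈ Finset.range (n - n / 2), (n.choose (n / 2 + 1 + i)) ^ 2
      = ∑ i ∈ Finset.range (n - n / 2), (n.choose i) ^ 2 := by
    rw [← Finset.sum_range_reflect (fun i => (n.choose i) ^ 2) (n - n / 2)]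
    refine Finset.sum_congr rfl ?_
    intro i hi
    rw [Finset.mem_range] at hi
    have h2 : n - n / 2 - 1 - i = n - (n / 2 + 1 + i) := by omega
    rw [h2, Nat.choose_symm (by omega)]
  rw [sum_sq_choose] at hsplit
  rcases Nat.even_or_odd n with he | ho
  · have hmod : n % 2 = 0 := Nat.even_iff.mp he
    have hnh : n - n / 2 = n / 2 := by omega
    have hS : ∑ r ∈ Finset.range (n / 2 + 1), (n.choose r) ^ 2
        = (∑ i ∈ Finset.range (n / 2), (n.choose i) ^ 2) + (n.choose (n / 2)) ^ 2 := by
      rw [Finset.sum_range_succ]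
    rw [hupper, hnh] at hsplit
    simp [hmod]
    omega
  · have hmod : n % 2 = 1 := Nat.odd_iff.mp ho
    have hnh : n - n / 2 = n / 2 + 1 := by omega
    rw [hupper, hnh] at hsplit
    simp [hmod]
    omega

-- A on a nonnegative input reduces to C(n+n, n) mod 10^9+7.
lemma evenLenBinary_natCast (n : ℕ) :
    evenLenBinary (n : Int) = PySem.Int.mod (((n + n).choose n : ℕ) : ℤ) (10 ^ 9 + 7) := by
  unfold evenLenBinary
  have hfd : PySem.Int.floordiv (n : Int) 2 = ((n / 2 : ℕ) : ℤ) := by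
    exact_mod_cast PySem.Int.floordiv_natCast n 2
  have hmod2 : PySem.Int.mod (n : Int) 2 = ((n % 2 : ℕ) : ℤ) := by
    exact_mod_cast PySem.Int.mod_natCast n 2
  simp only [hfd, hmod2]
  rw [foldA_eq n (n / 2) (by omega)]
  have hhs := half_sum n
  by_cases h0 : n % 2 = 0
  · rw [if_pos (by exact_mod_cast h0)]
    rw [if_pos h0] at hhs
    congr 1
    push_cast
    nlinarith [hhs]
  · rw [if_neg (by exact_mod_cast h0)]
    rw [if_neg h0] at hhs
    congr 1
    push_cast
    nlinarith [hhs]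

-- B on a nonnegative input reduces to C(n+n, n) mod 10^9+7.
lemma evenLenBinary_alt_natCast (n : ℕ) :
    evenLenBinary_alt (n : Int) = PySem.Int.mod (((n + n).choose n : ℕ) : ℤ) (10 ^ 9 + 7) := by
  unfold evenLenBinary_alt
  simp only
  rw [foldB_eq n n]

-- ===== VERDICT (by name: the statement is the Claim_ definition above) =====
theorem evenLenBinary_spec : Claim_equal_evenLenBinary := by
  intro n _ hpre
  obtain ⟨m, rfl⟩ := Int.eq_ofNat_of_zero_le hpre
  unfold Spec_evenLenBinary
  rw [evenLenBinary_natCast, evenLenBinary_alt_natCast]
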